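-- pv_equiv track=rewrite | github.com/peppinob-ol/neuron-signatures | docs/clt_prompt_probing/activation_heatmap.py | replace_special_tokens
-- ===== SOURCE A (Python) =====
-- def replace_special_tokens(token: str) -> str:
--     """
--     Replace special tokens with displayable characters.
--
--     Args:
--         token: Original token string
--
--     Returns:
--         Displayable token string
--     """
--     replacements = {
--         '\n': '↵',
--         '\t': '→',
--         ' ': '·',
--         '<bos>': '<BOS>',
--         '<eos>': '<EOS>',
--         '<|endoftext|>': '<EOT>',
--         '<|begin_of_text|>': '<BOT>',
--     }
--
--     # Check for exact matches first
--     if token in replacements: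
--         return replacements[token]
--
--     # Handle special Unicode characters
--     display_token = token
--     for old, new in replacements.items():
--         display_token = display_token.replace(old, new)
--
--     return display_token
-- ===== SOURCE B (Python) =====
-- import re
--
-- _REPLACEMENTS = {
--     '\n': '↵',
--     '\t': '→',
--     ' ': '·',
--     '<bos>': '<BOS>',
--     '<eos>': '<EOS>',
--     '<|endoftext|>': '<EOT>',
--     '<|begin_of_text|>': '<BOT>',
-- }
--
-- _PATTERN = re.compile('|'.join(re.escape(key) for key in _REPLACEMENTS))
--
--
-- def replace_special_tokens(token: str) -> str:
--     """Replace special tokens with displayable characters in one regex pass."""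
--     return _PATTERN.sub(lambda m: _REPLACEMENTS[m.group(0)], token)
-- ===== Notes on version B (the rewrite author's own statement) =====
-- stated objective: idiomatic
-- what changed: A's redundant exact-match early return and seven sequential full-string .replace passes are replaced by one compiled regex alternation over the escaped keys that does a single left-to-right scan, substituting each match via a dict lookup.
import Mathlib
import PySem

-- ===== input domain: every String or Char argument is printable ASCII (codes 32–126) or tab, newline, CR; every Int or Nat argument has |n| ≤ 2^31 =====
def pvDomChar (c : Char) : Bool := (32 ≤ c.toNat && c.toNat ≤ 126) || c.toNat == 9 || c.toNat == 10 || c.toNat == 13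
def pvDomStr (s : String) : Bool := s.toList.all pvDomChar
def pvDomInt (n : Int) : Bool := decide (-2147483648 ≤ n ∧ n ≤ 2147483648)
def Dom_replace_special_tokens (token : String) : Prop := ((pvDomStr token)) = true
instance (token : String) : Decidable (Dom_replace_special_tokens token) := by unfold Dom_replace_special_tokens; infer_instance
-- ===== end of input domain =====

-- B replaces A's seven sequential full-string .replace passes (plus an exact-match early return)
-- by one compiled regex alternation doing a single left-to-right scan with a dict lookup (idiomatic; not measured faster).

-- ===== PORT A =====
def replace_special_tokens (token : String) : String :=
  let replacements : PySem.Dict String String := PySem.Dict.ofList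
    [("\n", "↵"), ("\t", "→"), (" ", "·"), ("<bos>", "<BOS>"), ("<eos>", "<EOS>"),
     ("<|endoftext|>", "<EOT>"), ("<|begin_of_text|>", "<BOT>")]
  -- `if token in replacements: return replacements[token]`
  match PySem.Dict.get? replacements token with
  | some v => v
  | none =>
    -- `for old, new in replacements.items(): display_token = display_token.replace(old, new)`
    replacements.items.foldl (fun display_token p => PySem.Str.replace display_token p.1 p.2) token

-- ===== PORT B =====
-- Source B's compiled pattern `re.escape(k1)|…|re.escape(k7)` built from the dict keys, in dict order
def pvTable : List (List Char × List Char) :=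
  [("\n".toList, "↵".toList), ("\t".toList, "→".toList), (" ".toList, "·".toList),
   ("<bos>".toList, "<BOS>".toList), ("<eos>".toList, "<EOS>".toList),
   ("<|endoftext|>".toList, "<EOT>".toList), ("<|begin_of_text|>".toList, "<BOT>".toList)]

-- `pattern.sub(lambda m: replacements[m.group(0)], token)`: one left-to-right scan; at each
-- position the alternation tries the literal keys in pattern order, substitutes the looked-up
-- value and resumes after the match, otherwise the character is copied (exact port of re.sub
-- for this literal-alternation pattern).
def pvScanGo (T : List (List Char × List Char)) : Nat → List Char → List Char
  | 0, l => l
  | _ + 1, [] => []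
  | fuel + 1, c :: t =>
    match T.find? (fun p => p.1.isPrefixOf (c :: t)) with
    | some p => p.2 ++ pvScanGo T fuel (t.drop (p.1.length - 1))
    | none => c :: pvScanGo T fuel t

def pvScan (T : List (List Char × List Char)) (l : List Char) : List Char :=
  pvScanGo T l.length l

def replace_special_tokens_alt (token : String) : String :=
  String.ofList (pvScan pvTable token.toList)

-- ===== PRECONDITION & SPEC =====
def Spec_replace_special_tokens (token : String) (out : String) : Prop :=
  out = replace_special_tokens_alt token
instance (token : String) (out : String) : Decidable (Spec_replace_special_tokens token out) := by
  unfold Spec_replace_special_tokens; infer_instance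

-- ===== CLAIM (what is proved, stated in full; the proofs are below) =====
def Claim_equal_replace_special_tokens : Prop :=
  ∀ (token : String), Dom_replace_special_tokens token →
    Spec_replace_special_tokens token (replace_special_tokens token)

-- ===== LEMMAS AND PROOFS =====

-- Python's str.replace (one pass, leftmost, skipping over each substitution), structurally on lists
def pvRepl (old new : List Char) : List Char → List Char
  | [] => []
  | c :: t =>
    if old.isPrefixOf (c :: t) then new ++ pvRepl old new (t.drop (old.length - 1))
    else c :: pvRepl old new t
termination_by l => l.length
decreasing_by
  · simp only [List.length_cons]
    have : (t.drop (old.length - 1)).length ≤ t.length := by simp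
    omega
  · simp

theorem goEq (old new : List Char) (hold : old ≠ []) :
    ∀ (fuel : Nat) (l acc : List Char), l.length ≤ fuel →
      PySem.Chars.replace.go old new fuel l acc = acc.reverse ++ pvRepl old new l := by
  intro fuel
  induction fuel with
  | zero =>
    intro l acc hl
    have : l = [] := by cases l <;> simp_all
    subst this
    simp [PySem.Chars.replace.go.eq_1, pvRepl]
  | succ n ih =>
    intro l acc hl
    cases l with
    | nil => rw [PySem.Chars.replace.go.eq_def]; simp [pvRepl]
    | cons c t =>
      rw [PySem.Chars.replace.go.eq_def]
      by_cases hp : old.isPrefixOf (c :: t) = true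
      · simp only [hp, if_true]
        have hlen : old.length ≥ 1 := by cases old <;> simp_all
        have hdrop : List.drop old.length (c :: t) = t.drop (old.length - 1) := by
          cases old with
          | nil => simp_all
          | cons o ot => simp
        have h2 : (t.drop (old.length - 1)).length ≤ t.length := by simp
        have h3 : (List.drop (old.length - 1) t).length ≤ n := by simp at hl h2 ⊢; omega
        rw [hdrop, ih _ _ h3]
        rw [pvRepl]
        simp [hp]
      · simp only [hp]
        rw [ih t _ (by simp at hl; omega)]
        rw [pvRepl]
        simp [hp]

theorem replace_eq_pvRepl (old new l : List Char) (hold : old ≠ []) :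
    PySem.Chars.replace l old new = pvRepl old new l := by
  rw [PySem.Chars.replace]
  have : old.isEmpty = false := by cases old <;> simp_all
  rw [this]
  simp only [Bool.false_eq_true, if_false]
  rw [goEq old new hold l.length l [] (le_refl _)]
  simp

theorem pvRepl_distrib (old new p : List Char)
    (h : ∀ m, m < p.length → ¬ old <+: p.drop m ∧ ¬ p.drop m <+: old) :
    ∀ x, pvRepl old new (p ++ x) = p ++ pvRepl old new x := by
  induction p with
  | nil => intro x; simp
  | cons c q ih =>
    intro x
    have hnp : ¬ old.isPrefixOf ((c :: q) ++ x) = true := by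
      intro hp
      rw [List.isPrefixOf_iff_prefix] at hp
      have h2 : (c :: q) <+: (c :: q) ++ x := List.prefix_append _ _
      rcases List.prefix_or_prefix_of_prefix hp h2 with h3 | h3
      · exact (h 0 (by simp)).1 (by simpa using h3)
      · exact (h 0 (by simp)).2 (by simpa using h3)
    rw [List.cons_append, pvRepl]
    rw [List.cons_append] at hnp
    simp only [hnp, if_false, Bool.false_eq_true]
    rw [ih (fun m hm => h (m+1) (by simp; omega))]
    simp

theorem pvRepl_head (old new x : List Char) (hold : old ≠ []) :
    pvRepl old new (old ++ x) = new ++ pvRepl old new x := by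
  obtain ⟨o, ot, rfl⟩ : ∃ o ot, old = o :: ot := by
    cases old with
    | nil => exact absurd rfl hold
    | cons o ot => exact ⟨o, ot, rfl⟩
  rw [List.cons_append, pvRepl]
  have hp : (o :: ot).isPrefixOf (o :: (ot ++ x)) = true := by
    rw [List.isPrefixOf_iff_prefix]
    exact List.prefix_append _ _
  simp only [hp, if_true]
  congr 1
  congr 1
  simp

theorem pvScanGo_congr (T : List (List Char × List Char)) :
    ∀ f1 f2 (l : List Char), l.length ≤ f1 → l.length ≤ f2 →
      pvScanGo T f1 l = pvScanGo T f2 l := by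
  intro f1
  induction f1 with
  | zero =>
    intro f2 l h1 h2
    have : l = [] := by cases l <;> simp_all
    subst this
    cases f2 <;> rfl
  | succ n ih =>
    intro f2 l h1 h2
    cases l with
    | nil => cases f2 <;> rfl
    | cons c t =>
      cases f2 with
      | zero => simp at h2
      | succ m =>
        rw [pvScanGo, pvScanGo]
        cases hf : T.find? (fun p => p.1.isPrefixOf (c :: t)) with
        | some p =>
          have hd : (t.drop (p.1.length - 1)).length ≤ t.length := by simp
          exact congrArg (p.2 ++ ·) (ih m _ (by simp at h1; omega) (by simp at h2; omega))
        | none =>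
          exact congrArg (c :: ·) (ih m t (by simp at h1; omega) (by simp at h2; omega))

theorem pvScan_nil (T : List (List Char × List Char)) : pvScan T [] = [] := rfl

theorem pvScan_cons (T : List (List Char × List Char)) (c : Char) (t : List Char) :
    pvScan T (c :: t) =
      match T.find? (fun p => p.1.isPrefixOf (c :: t)) with
      | some p => p.2 ++ pvScan T (t.drop (p.1.length - 1))
      | none => c :: pvScan T t := by
  show pvScanGo T (t.length + 1) (c :: t) = _
  rw [pvScanGo]
  cases hf : T.find? (fun p => p.1.isPrefixOf (c :: t)) with
  | some p => exact congrArg (p.2 ++ ·) (pvScanGo_congr T t.length _ _ (by simp) le_rfl)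
  | none => rfl

theorem pvScan_distrib (T : List (List Char × List Char)) (p : List Char)
    (h : ∀ kv ∈ T, ∀ m, m < p.length → ¬ kv.1 <+: p.drop m ∧ ¬ p.drop m <+: kv.1) :
    ∀ x, pvScan T (p ++ x) = p ++ pvScan T x := by
  induction p with
  | nil => intro x; simp
  | cons c q ih =>
    intro x
    have hf : T.find? (fun kv => kv.1.isPrefixOf (c :: (q ++ x))) = none := by
      rw [List.find?_eq_none]
      intro kv hkv hp
      rw [List.isPrefixOf_iff_prefix] at hp
      have h2 : (c :: q) <+: (c :: q) ++ x := List.prefix_append _ _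
      rw [List.cons_append] at h2
      rcases List.prefix_or_prefix_of_prefix hp h2 with h3 | h3
      · exact (h kv hkv 0 (by simp)).1 (by simpa using h3)
      · exact (h kv hkv 0 (by simp)).2 (by simpa using h3)
    rw [List.cons_append, pvScan_cons]
    rw [hf]
    rw [ih (fun kv hkv m hm => h kv hkv (m+1) (by simp; omega))]
    simp

theorem pvScan_noCreate (T : List (List Char × List Char)) :
    ∀ (t q : List Char), q ≠ [] →
      (∀ j, j < q.length → ∀ kv ∈ T, ¬ q.drop j <+: kv.2 ∧ ¬ kv.2 <+: q.drop j) →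
      q <+: pvScan T t → q <+: t := by
  have main : ∀ n (t q : List Char), t.length ≤ n → q ≠ [] →
      (∀ j, j < q.length → ∀ kv ∈ T, ¬ q.drop j <+: kv.2 ∧ ¬ kv.2 <+: q.drop j) →
      q <+: pvScan T t → q <+: t := by
    intro n
    induction n with
    | zero =>
      intro t q ht hq hcond hpre
      have : t = [] := by cases t <;> simp_all
      subst this
      rw [pvScan_nil] at hpre
      simp at hpre
      exact absurd hpre hq
    | succ n ih =>
      intro t q ht hq hcond hpre
      cases t with
      | nil =>
        rw [pvScan_nil] at hpre
        simp at hpre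
        exact absurd hpre hq
      | cons c t =>
        rw [pvScan_cons] at hpre
        cases hf : T.find? (fun p => p.1.isPrefixOf (c :: t)) with
        | some p =>
          rw [hf] at hpre
          exfalso
          have hv : p.2 <+: p.2 ++ pvScan T (t.drop (p.1.length - 1)) := List.prefix_append _ _
          have hmem : p ∈ T := List.mem_of_find?_eq_some hf
          rcases List.prefix_or_prefix_of_prefix hpre hv with h3 | h3
          · exact (hcond 0 (by cases q <;> simp_all) p hmem).1 (by simpa using h3)
          · exact (hcond 0 (by cases q <;> simp_all) p hmem).2 (by simpa using h3)
        | none =>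
          rw [hf] at hpre
          obtain ⟨d, q', rfl⟩ : ∃ d q', q = d :: q' := by
            cases q with
            | nil => exact absurd rfl hq
            | cons d q' => exact ⟨d, q', rfl⟩
          rw [List.cons_prefix_cons] at hpre
          obtain ⟨rfl, hpre⟩ := hpre
          cases q' with
          | nil => simp
          | cons e q'' =>
            have := ih t (e :: q'') (by simp at ht; omega) (by simp)
              (fun j hj kv hkv => hcond (j+1) (by simp at hj ⊢; omega) kv hkv) hpre
            rw [List.cons_prefix_cons]
            exact ⟨rfl, this⟩
  exact fun t q => main t.length t q le_rfl

theorem pvScan_nil_table : ∀ l : List Char, pvScan [] l = l := by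
  intro l
  induction l with
  | nil => rw [pvScan_nil]
  | cons c t ih => rw [pvScan_cons]; simp [ih]

theorem pvStep (T : List (List Char × List Char)) (k v : List Char) (hk : k ≠ [])
    (hA : ∀ kv ∈ T, ∀ m, m < kv.2.length → ¬ k <+: kv.2.drop m ∧ ¬ kv.2.drop m <+: k)
    (hB : ∀ kv ∈ T, ∀ m, m < k.length → ¬ kv.1 <+: k.drop m ∧ ¬ k.drop m <+: kv.1)
    (hC : ∀ j, j < k.length - 1 → ∀ kv ∈ T, ¬ k.drop (1 + j) <+: kv.2 ∧ ¬ kv.2 <+: k.drop (1 + j)) :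
    ∀ y, pvRepl k v (pvScan T y) = pvScan (T ++ [(k, v)]) y := by
  have main : ∀ n (y : List Char), y.length ≤ n →
      pvRepl k v (pvScan T y) = pvScan (T ++ [(k, v)]) y := by
    intro n
    induction n with
    | zero =>
      intro y hy
      have : y = [] := by cases y <;> simp_all
      subst this
      rw [pvScan_nil, pvScan_nil, pvRepl]
    | succ n ih =>
      intro y hy
      cases y with
      | nil => rw [pvScan_nil, pvScan_nil, pvRepl]
      | cons c t =>
      cases hf : T.find? (fun p => p.1.isPrefixOf (c :: t)) with
      | some p =>
        have hmem : p ∈ T := List.mem_of_find?_eq_some hf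
        rw [pvScan_cons, hf]
        rw [pvRepl_distrib k v p.2 (fun m hm => hA p hmem m hm) _]
        have hlen : (t.drop (p.1.length - 1)).length ≤ n := by
          have : (t.drop (p.1.length - 1)).length ≤ t.length := by simp
          simp at hy; omega
        rw [ih _ hlen]
        have hf' : (T ++ [(k, v)]).find? (fun q => q.1.isPrefixOf (c :: t)) = some p := by
          rw [List.find?_append, hf]; rfl
        rw [pvScan_cons, hf']
      | none =>
        by_cases hp : k.isPrefixOf (c :: t) = true
        · -- k matches at the head
          rw [List.isPrefixOf_iff_prefix] at hp
          obtain ⟨r, hr⟩ := hp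
          rw [← hr]
          rw [pvScan_distrib T k (fun kv hkv m hm => hB kv hkv m hm) r]
          rw [pvRepl_head k v _ hk]
          have hlen : r.length ≤ n := by
            have h1 : k.length + r.length = t.length + 1 := by
              have := congrArg List.length hr; simpa using this
            have h2 : 1 ≤ k.length := by cases k <;> simp_all
            simp at hy; omega
          rw [ih _ hlen]
          have hfr : (T ++ [(k, v)]).find? (fun q => q.1.isPrefixOf (c :: t)) = some (k, v) := by
            rw [List.find?_append, hf]
            simp only [Option.none_or]
            have : k.isPrefixOf (c :: t) = true := by
              rw [List.isPrefixOf_iff_prefix]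
              exact ⟨r, hr⟩
            simp [List.find?, this]
          rw [hr, pvScan_cons, hfr]
          congr 1
          obtain ⟨d, k', rfl⟩ : ∃ d k', k = d :: k' := by
            cases k with
            | nil => exact absurd rfl hk
            | cons d k' => exact ⟨d, k', rfl⟩
          have ht : t = k' ++ r := by
            rw [List.cons_append] at hr
            exact (List.cons.inj hr).2.symm
          rw [ht]
          simp
        · -- nothing matches at the head
          rw [pvScan_cons, hf]
          have hknot : ¬ k.isPrefixOf (c :: pvScan T t) = true := by
            intro habs
            rw [List.isPrefixOf_iff_prefix] at habs
            obtain ⟨d, k', rfl⟩ : ∃ d k', k = d :: k' := by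
              cases k with
              | nil => exact absurd rfl hk
              | cons d k' => exact ⟨d, k', rfl⟩
            rw [List.cons_prefix_cons] at habs
            obtain ⟨rfl, habs⟩ := habs
            cases k' with
            | nil =>
              apply hp
              rw [List.isPrefixOf_iff_prefix]
              simp
            | cons e k'' =>
              have := pvScan_noCreate T t (e :: k'') (by simp)
                (fun j hj kv hkv => by
                  have h0 : List.drop (1 + j) (d :: e :: k'') = List.drop j (e :: k'') := by
                    rw [Nat.add_comm]; rfl
                  exact h0 ▸ hC j (by simp at hj ⊢; omega) kv hkv) habs
              apply hp
              rw [List.isPrefixOf_iff_prefix, List.cons_prefix_cons]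
              exact ⟨rfl, this⟩
          rw [pvRepl]
          simp only [hknot, if_false, Bool.false_eq_true]
          have hlen : t.length ≤ n := by simp at hy; omega
          rw [ih _ hlen]
          have hf' : (T ++ [(k, v)]).find? (fun q => q.1.isPrefixOf (c :: t)) = none := by
            rw [List.find?_append, hf]
            simp only [Option.none_or]
            rw [List.find?_eq_none]
            intro q hq
            simp only [List.mem_singleton] at hq
            subst hq
            simpa using hp
          rw [pvScan_cons, hf']
  exact fun y => main y.length y le_rfl

theorem chain_eq_scan (l : List Char) :
    pvRepl "<|begin_of_text|>".toList "<BOT>".toList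
      (pvRepl "<|endoftext|>".toList "<EOT>".toList
        (pvRepl "<eos>".toList "<EOS>".toList
          (pvRepl "<bos>".toList "<BOS>".toList
            (pvRepl " ".toList "·".toList
              (pvRepl "\t".toList "→".toList
                (pvRepl "\n".toList "↵".toList l)))))) = pvScan pvTable l := by
  have e1 : pvRepl "\n".toList "↵".toList l = pvScan [("\n".toList, "↵".toList)] l := by
    have := pvStep [] "\n".toList "↵".toList (by decide) (by decide) (by decide) (by decide) l
    rw [pvScan_nil_table] at this
    simpa using this
  have e2 : ∀ x, pvRepl "\t".toList "→".toList (pvScan [("\n".toList, "↵".toList)] x) = pvScan [("\n".toList, "↵".toList), ("\t".toList, "→".toList)] x := by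
    intro x
    have := pvStep [("\n".toList, "↵".toList)] "\t".toList "→".toList (by decide) (by decide) (by decide) (by decide) x
    simpa using this
  have e3 : ∀ x, pvRepl " ".toList "·".toList (pvScan [("\n".toList, "↵".toList), ("\t".toList, "→".toList)] x) = pvScan [("\n".toList, "↵".toList), ("\t".toList, "→".toList), (" ".toList, "·".toList)] x := by
    intro x
    have := pvStep [("\n".toList, "↵".toList), ("\t".toList, "→".toList)] " ".toList "·".toList (by decide) (by decide) (by decide) (by decide) x
    simpa using this
  have e4 : ∀ x, pvRepl "<bos>".toList "<BOS>".toList (pvScan [("\n".toList, "↵".toList), ("\t".toList, "→".toList), (" ".toList, "·".toList)] x) = pvScan [("\n".toList, "↵".toList), ("\t".toList, "→".toList), (" ".toList, "·".toList), ("<bos>".toList, "<BOS>".toList)] x := by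
    intro x
    have := pvStep [("\n".toList, "↵".toList), ("\t".toList, "→".toList), (" ".toList, "·".toList)] "<bos>".toList "<BOS>".toList (by decide) (by decide) (by decide) (by decide) x
    simpa using this
  have e5 : ∀ x, pvRepl "<eos>".toList "<EOS>".toList (pvScan [("\n".toList, "↵".toList), ("\t".toList, "→".toList), (" ".toList, "·".toList), ("<bos>".toList, "<BOS>".toList)] x) = pvScan [("\n".toList, "↵".toList), ("\t".toList, "→".toList), (" ".toList, "·".toList), ("<bos>".toList, "<BOS>".toList), ("<eos>".toList, "<EOS>".toList)] x := by
    intro x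
    have := pvStep [("\n".toList, "↵".toList), ("\t".toList, "→".toList), (" ".toList, "·".toList), ("<bos>".toList, "<BOS>".toList)] "<eos>".toList "<EOS>".toList (by decide) (by decide) (by decide) (by decide) x
    simpa using this
  have e6 : ∀ x, pvRepl "<|endoftext|>".toList "<EOT>".toList (pvScan [("\n".toList, "↵".toList), ("\t".toList, "→".toList), (" ".toList, "·".toList), ("<bos>".toList, "<BOS>".toList), ("<eos>".toList, "<EOS>".toList)] x) = pvScan [("\n".toList, "↵".toList), ("\t".toList, "→".toList), (" ".toList, "·".toList), ("<bos>".toList, "<BOS>".toList), ("<eos>".toList, "<EOS>".toList), ("<|endoftext|>".toList, "<EOT>".toList)] x := by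
    intro x
    have := pvStep [("\n".toList, "↵".toList), ("\t".toList, "→".toList), (" ".toList, "·".toList), ("<bos>".toList, "<BOS>".toList), ("<eos>".toList, "<EOS>".toList)] "<|endoftext|>".toList "<EOT>".toList (by decide) (by decide) (by decide) (by decide) x
    simpa using this
  have e7 : ∀ x, pvRepl "<|begin_of_text|>".toList "<BOT>".toList (pvScan [("\n".toList, "↵".toList), ("\t".toList, "→".toList), (" ".toList, "·".toList), ("<bos>".toList, "<BOS>".toList), ("<eos>".toList, "<EOS>".toList), ("<|endoftext|>".toList, "<EOT>".toList)] x) = pvScan [("\n".toList, "↵".toList), ("\t".toList, "→".toList), (" ".toList, "·".toList), ("<bos>".toList, "<BOS>".toList), ("<eos>".toList, "<EOS>".toList), ("<|endoftext|>".toList, "<EOT>".toList), ("<|begin_of_text|>".toList, "<BOT>".toList)] x := by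
    intro x
    have := pvStep [("\n".toList, "↵".toList), ("\t".toList, "→".toList), (" ".toList, "·".toList), ("<bos>".toList, "<BOS>".toList), ("<eos>".toList, "<EOS>".toList), ("<|endoftext|>".toList, "<EOT>".toList)] "<|begin_of_text|>".toList "<BOT>".toList (by decide) (by decide) (by decide) (by decide) x
    simpa using this
  rw [e1, e2, e3, e4, e5, e6, e7]
  rfl

def pvDict : PySem.Dict String String := PySem.Dict.ofList
    [("\n", "↵"), ("\t", "→"), (" ", "·"), ("<bos>", "<BOS>"), ("<eos>", "<EOS>"),
     ("<|endoftext|>", "<EOT>"), ("<|begin_of_text|>", "<BOT>")]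

theorem pvDict_items : pvDict.items =
    [("\n", "↵"), ("\t", "→"), (" ", "·"), ("<bos>", "<BOS>"), ("<eos>", "<EOS>"),
     ("<|endoftext|>", "<EOT>"), ("<|begin_of_text|>", "<BOT>")] := by decide

theorem pvGetNone (token : String)
    (h1 : token ≠ "\n") (h2 : token ≠ "\t") (h3 : token ≠ " ") (h4 : token ≠ "<bos>")
    (h5 : token ≠ "<eos>") (h6 : token ≠ "<|endoftext|>") (h7 : token ≠ "<|begin_of_text|>") :
    PySem.Dict.get? pvDict token = none := by
  rw [PySem.Dict.get?, pvDict_items]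
  have b1 : ("\n" == token) = false := by simp [Ne.symm h1]
  have b2 : ("\t" == token) = false := by simp [Ne.symm h2]
  have b3 : (" " == token) = false := by simp [Ne.symm h3]
  have b4 : ("<bos>" == token) = false := by simp [Ne.symm h4]
  have b5 : ("<eos>" == token) = false := by simp [Ne.symm h5]
  have b6 : ("<|endoftext|>" == token) = false := by simp [Ne.symm h6]
  have b7 : ("<|begin_of_text|>" == token) = false := by simp [Ne.symm h7]
  simp [List.find?, b1, b2, b3, b4, b5, b6, b7]

theorem strReplace_eq (s old new : String) (h : old.toList ≠ []) :
    PySem.Str.replace s old new = String.ofList (pvRepl old.toList new.toList s.toList) := by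
  rw [PySem.Str.replace, replace_eq_pvRepl _ _ _ h]

-- ===== VERDICT (by name: the statement is the Claim_ definition above) =====
theorem replace_special_tokens_spec : Claim_equal_replace_special_tokens := by
  unfold Claim_equal_replace_special_tokens Spec_replace_special_tokens
  intro token _
  by_cases h1 : token = "\n"
  · subst h1; exact String.toList_inj.mp (by decide)
  by_cases h2 : token = "\t"
  · subst h2; exact String.toList_inj.mp (by decide)
  by_cases h3 : token = " "
  · subst h3; exact String.toList_inj.mp (by decide)
  by_cases h4 : token = "<bos>"
  · subst h4; exact String.toList_inj.mp (by decide)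
  by_cases h5 : token = "<eos>"
  · subst h5; exact String.toList_inj.mp (by decide)
  by_cases h6 : token = "<|endoftext|>"
  · subst h6; exact String.toList_inj.mp (by decide)
  by_cases h7 : token = "<|begin_of_text|>"
  · subst h7; exact String.toList_inj.mp (by decide)
  have hget : PySem.Dict.get? pvDict token = none :=
    pvGetNone token h1 h2 h3 h4 h5 h6 h7
  show replace_special_tokens token = replace_special_tokens_alt token
  unfold replace_special_tokens replace_special_tokens_alt
  rw [show (PySem.Dict.ofList
    [("\n", "↵"), ("\t", "→"), (" ", "·"), ("<bos>", "<BOS>"), ("<eos>", "<EOS>"),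
     ("<|endoftext|>", "<EOT>"), ("<|begin_of_text|>", "<BOT>")] : PySem.Dict String String) = pvDict from rfl]
  show (match PySem.Dict.get? pvDict token with
    | some v => v
    | none => pvDict.items.foldl (fun display_token p => PySem.Str.replace display_token p.1 p.2) token)
    = String.ofList (pvScan pvTable token.toList)
  rw [hget]
  rw [pvDict_items]
  simp only [List.foldl_cons, List.foldl_nil]
  rw [strReplace_eq _ _ _ (by decide), strReplace_eq _ _ _ (by decide),
      strReplace_eq _ _ _ (by decide), strReplace_eq _ _ _ (by decide),
      strReplace_eq _ _ _ (by decide), strReplace_eq _ _ _ (by decide),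
      strReplace_eq _ _ _ (by decide)]
  simp only [String.toList_ofList]
  rw [chain_eq_scan]
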